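-- pv_equiv track=rewrite | github.com/ModPunchtree/URCL-Optimiser-V2 | URCLOptimiserV2/urcl_optimiser_v2.py | moveDWValues
-- ===== SOURCE A (Python) =====
-- def moveDWValues(code: list):
--
--     success = False
--
--     DW = []
--     code2 = []
--     lastLabels = []
--     for line in code:
--         if line[0] == "DW":
--             DW += lastLabels
--             lastLabels = []
--             DW.append(line)
--         elif line[0].startswith("."):
--             lastLabels.append(line)
--         else:
--             code2 += lastLabels
--             lastLabels = []
--             code2.append(line)
--
--     code2 += DW
--
--     if code2 != code:
--         success = True
--
--     return code2, success
-- ===== SOURCE B (Python) =====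
-- def moveDWValues(code: list):
--     # One pass: group each run of label lines with the first following
--     # non-label line; trailing labels stay in an unfinished buffer and
--     # are (as in A) dropped.  Then flatten non-DW groups, then DW groups.
--     groups = []
--     buf = []
--     for line in code:
--         buf.append(line)
--         if not line[0].startswith("."):
--             groups.append(buf)
--             buf = []
--     result = [l for g in groups if g[-1][0] != "DW" for l in g] + \
--              [l for g in groups if g[-1][0] == "DW" for l in g]
--     return result, result != code
-- ===== Notes on version B (the rewrite author's own statement) =====
-- stated objective: alternative
-- what changed: Instead of threading three accumulator lists (DW, code2, lastLabels) through one loop, B builds a list of label-run+terminator groups in one pass and then produces the result by two flattening comprehensions over the groups (non-DW groups first, DW groups last); trailing labels remain in an unflushed buffer, reproducing A's dropping of them.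
import Mathlib
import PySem

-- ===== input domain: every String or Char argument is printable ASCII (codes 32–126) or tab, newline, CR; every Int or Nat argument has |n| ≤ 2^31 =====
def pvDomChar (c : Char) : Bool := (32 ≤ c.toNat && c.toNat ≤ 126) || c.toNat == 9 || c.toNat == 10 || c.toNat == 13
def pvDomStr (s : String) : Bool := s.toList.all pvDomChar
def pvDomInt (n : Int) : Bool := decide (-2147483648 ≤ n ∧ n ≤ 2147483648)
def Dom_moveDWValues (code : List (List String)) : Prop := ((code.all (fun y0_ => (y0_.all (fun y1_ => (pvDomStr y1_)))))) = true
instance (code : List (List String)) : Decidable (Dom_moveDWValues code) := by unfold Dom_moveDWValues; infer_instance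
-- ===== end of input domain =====

-- B replaces A's three threaded accumulators by a one-pass grouping (label run + terminator)
-- followed by two flattening filters (non-DW groups first, DW groups last); same cost, different decomposition.


-- ===== PORT A =====
-- fold state: (DW, code2, lastLabels); line[0] is total here because Pre_ excludes empty lines
-- (headD "" is only reached outside Pre_).
def pvStepA (st : List (List String) × List (List String) × List (List String))
    (line : List String) : List (List String) × List (List String) × List (List String) :=
  let h := line.headD ""
  if h == "DW" then (st.1 ++ st.2.2 ++ [line], st.2.1, [])
  else if PySem.Str.startswith h "." then (st.1, st.2.1, st.2.2 ++ [line])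
  else (st.1, st.2.1 ++ st.2.2 ++ [line], [])

def moveDWValues (code : List (List String)) : List (List String) × Bool :=
  let s := code.foldl pvStepA ([], [], [])
  let code2 := s.2.1 ++ s.1
  (code2, code2 != code)

-- ===== PORT B =====
-- one pass: buffer label lines, close a group at each non-label line; trailing buffer dropped
def pvGroups : List (List String) → List (List String) → List (List (List String))
  | [], _ => []
  | line :: rest, buf =>
    let buf' := buf ++ [line]
    if PySem.Str.startswith (line.headD "") "." then pvGroups rest buf'
    else buf' :: pvGroups rest []

def moveDWValues_alt (code : List (List String)) : List (List String) × Bool :=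
  let groups := pvGroups code []
  let result :=
    (groups.filter (fun g => (g.getLastD []).headD "" != "DW")).flatten ++
    (groups.filter (fun g => (g.getLastD []).headD "" == "DW")).flatten
  (result, result != code)

-- ===== PRECONDITION & SPEC =====
-- Pre_ excludes exactly the inputs containing an empty line, on which Python A raises IndexError at line[0].
def Pre_moveDWValues (code : List (List String)) : Prop := ∀ line ∈ code, line ≠ []
instance (code : List (List String)) : Decidable (Pre_moveDWValues code) := by unfold Pre_moveDWValues; infer_instance
def pvWitness_moveDWValues : List (List String) := [[".lbl"], ["DW", "3"], ["ADD", "r1", "r1"]]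

def Spec_moveDWValues (code : List (List String)) (out : List (List String) × Bool) : Prop := out = moveDWValues_alt code
instance (code : List (List String)) (out : List (List String) × Bool) : Decidable (Spec_moveDWValues code out) := by unfold Spec_moveDWValues; infer_instance

-- ===== CLAIM (what is proved, stated in full; the proofs are below) =====
def Claim_equal_moveDWValues : Prop := ∀ (code : List (List String)), Dom_moveDWValues code → Pre_moveDWValues code → Spec_moveDWValues code (moveDWValues code)

-- ===== LEMMAS AND PROOFS =====

-- B's two buckets, parameterised by the running buffer
def pvKeep (code buf : List (List String)) : List (List String) :=
  ((pvGroups code buf).filter (fun g => (g.getLastD []).headD "" != "DW")).flatten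
def pvMoved (code buf : List (List String)) : List (List String) :=
  ((pvGroups code buf).filter (fun g => (g.getLastD []).headD "" == "DW")).flatten

theorem pvFold_inv (code : List (List String)) :
    ∀ (dw c2 buf : List (List String)),
      (code.foldl pvStepA (dw, c2, buf)).1 = dw ++ pvMoved code buf ∧
      (code.foldl pvStepA (dw, c2, buf)).2.1 = c2 ++ pvKeep code buf := by
  induction code with
  | nil => intro dw c2 buf; simp [pvMoved, pvKeep, pvGroups]
  | cons line rest ih =>
    intro dw c2 buf
    simp only [pvMoved, pvKeep] at ih ⊢
    by_cases hdw : line.headD "" = "DW"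
    · have hb : (line.headD "" == "DW") = true := by simpa using hdw
      have hns : PySem.Str.startswith (line.headD "") "." = false := by rw [hdw]; decide
      have h1 := ih (dw ++ buf ++ [line]) c2 []
      simp only [List.foldl_cons, pvStepA, pvGroups, hb, hns, Bool.false_eq_true, if_true,
        if_false, ite_true, ite_false, List.filter_cons, List.getLastD_concat, bne,
        Bool.not_true, List.flatten_cons]
      refine ⟨?_, ?_⟩
      · rw [h1.1]; simp [List.append_assoc]
      · exact h1.2
    · have hb : (line.headD "" == "DW") = false := by simpa using hdw
      by_cases hst : PySem.Str.startswith (line.headD "") "." = true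
      · have h1 := ih dw c2 (buf ++ [line])
        simp only [List.foldl_cons, pvStepA, pvGroups, hb, hst, Bool.false_eq_true, if_true,
          if_false, ite_true, ite_false]
        exact h1
      · have hst' : PySem.Str.startswith (line.headD "") "." = false := by simpa using hst
        have h1 := ih dw (c2 ++ buf ++ [line]) []
        simp only [List.foldl_cons, pvStepA, pvGroups, hb, hst', Bool.false_eq_true, if_true,
          if_false, ite_true, ite_false, List.filter_cons, List.getLastD_concat, bne,
          Bool.not_false, List.flatten_cons]
        refine ⟨?_, ?_⟩
        · exact h1.1
        · rw [h1.2]; simp [List.append_assoc, bne]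

theorem moveDWValues_spec : Claim_equal_moveDWValues := by
  intro code _ _
  unfold Spec_moveDWValues moveDWValues moveDWValues_alt
  have h := pvFold_inv code [] [] []
  simp only [List.nil_append] at h
  simp only [h.1, h.2, pvMoved, pvKeep]
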